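-- pv_equiv track=rewrite | github.com/vpontis/advent-of-code-2019 | 17/17.py | check_functions
-- ===== SOURCE A (Python) =====
-- from typing import Union, List
--
-- def check_functions(path, part_a, part_b, part_c) -> List[str]:
--     if len(path) == 0:
--         return []
--
--     a_works = path[:len(part_a)] == part_a
--     if a_works:
--         return ['A'] + check_functions(path[len(part_a):], part_a, part_b, part_c)
--
--     b_works = path[:len(part_b)] == part_b
--     if b_works:
--         # b_works = check_functions(path[len(part_b):], part_a, part_b, part_c)
--         return ['B'] + check_functions(path[len(part_b):], part_a, part_b, part_c)
--
--     c_works = path[:len(part_c)] == part_c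
--     if c_works:
--         # c_works = check_functions(path[len(part_c):], part_a, part_b, part_c)
--         return ['C'] + check_functions(path[len(part_c):], part_a, part_b, part_c)
--
--     return []
-- ===== SOURCE B (Python) =====
-- def check_functions(path, part_a, part_b, part_c):
--     result = []
--     rem = path
--     while rem:
--         if rem[:len(part_a)] == part_a:
--             result.append('A')
--             rem = rem[len(part_a):]
--         elif rem[:len(part_b)] == part_b:
--             result.append('B')
--             rem = rem[len(part_b):]
--         elif rem[:len(part_c)] == part_c:
--             result.append('C')
--             rem = rem[len(part_c):]
--         else:
--             break
--     return result
-- ===== Notes on version B (the rewrite author's own statement) =====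
-- stated objective: simpler
-- what changed: Replaces A's recursion (one Python call frame and one list concatenation per matched part) with a single iterative while-loop that slices the remaining path and appends labels to an accumulator.
-- outside the precondition, e.g. on check_functions(['a'], ['a'], [], ['c']): A returns ['A'], B returns ['A']
import Mathlib
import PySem

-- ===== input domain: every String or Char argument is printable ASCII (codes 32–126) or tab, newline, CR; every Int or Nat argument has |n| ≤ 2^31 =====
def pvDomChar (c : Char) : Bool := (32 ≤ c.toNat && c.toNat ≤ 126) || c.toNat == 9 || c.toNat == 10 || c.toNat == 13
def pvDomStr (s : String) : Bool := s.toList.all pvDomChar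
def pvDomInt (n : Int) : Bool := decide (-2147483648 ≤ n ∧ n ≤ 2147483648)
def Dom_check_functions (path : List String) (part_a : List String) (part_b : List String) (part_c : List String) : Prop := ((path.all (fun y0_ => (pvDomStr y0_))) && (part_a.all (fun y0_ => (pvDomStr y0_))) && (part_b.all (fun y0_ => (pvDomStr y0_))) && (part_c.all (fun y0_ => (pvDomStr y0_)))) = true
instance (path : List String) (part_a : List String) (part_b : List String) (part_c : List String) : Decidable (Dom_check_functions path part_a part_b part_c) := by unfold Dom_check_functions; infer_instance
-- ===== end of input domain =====

-- B replaces A's recursion with an iterative loop over the remaining path and an accumulator (objective: simpler).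


-- ===== PORT A =====
-- Literal port of A's recursion. path[:n] / path[n:] with n = len(part) ≥ 0 are
-- exactly List.take n / List.drop n. The 'part = []' branches are totality guards
-- only: there Python recurses on the unchanged path forever (RecursionError), which
-- Pre_check_functions excludes.
def check_functions (path : List String) (part_a : List String) (part_b : List String) (part_c : List String) : List String :=
  if path = [] then []
  else if path.take part_a.length = part_a then
    if _h : part_a = [] then []  -- totality guard (Python diverges here; outside Pre_)
    else "A" :: check_functions (path.drop part_a.length) part_a part_b part_c
  else if path.take part_b.length = part_b then
    if _h : part_b = [] then []  -- totality guard
    else "B" :: check_functions (path.drop part_b.length) part_a part_b part_c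
  else if path.take part_c.length = part_c then
    if _h : part_c = [] then []  -- totality guard
    else "C" :: check_functions (path.drop part_c.length) part_a part_b part_c
  else []
termination_by path.length
decreasing_by
  all_goals
    simp only [List.length_drop]
    have hpath : 0 < path.length := List.length_pos_iff.mpr (by assumption)
    first
    | (have : 0 < part_a.length := List.length_pos_iff.mpr (by assumption); omega)
    | (have : 0 < part_b.length := List.length_pos_iff.mpr (by assumption); omega)
    | (have : 0 < part_c.length := List.length_pos_iff.mpr (by assumption); omega)

-- ===== PORT B =====
-- Port of Source B's while-loop: fuel = path.length + 1 bounds the iterations (under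
-- Pre_ every iteration drops at least one element, so the fuel is never exhausted);
-- rem is the remaining path, acc the accumulated labels.
def cfLoop (part_a part_b part_c : List String) : Nat → List String → List String → List String
  | 0, _, acc => acc
  | fuel + 1, rem, acc =>
    if rem = [] then acc
    else if rem.take part_a.length = part_a then
      cfLoop part_a part_b part_c fuel (rem.drop part_a.length) (acc ++ ["A"])
    else if rem.take part_b.length = part_b then
      cfLoop part_a part_b part_c fuel (rem.drop part_b.length) (acc ++ ["B"])
    else if rem.take part_c.length = part_c then
      cfLoop part_a part_b part_c fuel (rem.drop part_c.length) (acc ++ ["C"])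
    else acc

def check_functions_alt (path : List String) (part_a : List String) (part_b : List String) (part_c : List String) : List String :=
  cfLoop part_a part_b part_c (path.length + 1) path []

-- ===== PRECONDITION & SPEC =====
-- Pre_ excludes inputs with a nonempty path and some empty part: when an empty part is the
-- first match A raises RecursionError and B loops forever; where A still returns there
-- (an earlier nonempty part always matches first) B returns the same value anyway.
def Pre_check_functions (path : List String) (part_a : List String) (part_b : List String) (part_c : List String) : Prop :=
  path = [] ∨ (part_a ≠ [] ∧ part_b ≠ [] ∧ part_c ≠ [])
instance (path : List String) (part_a : List String) (part_b : List String) (part_c : List String) : Decidable (Pre_check_functions path part_a part_b part_c) := by unfold Pre_check_functions; infer_instance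

def pvWitness_check_functions : List String × List String × List String × List String :=
  (["R", "8", "L", "4"], ["R", "8"], ["L", "4"], ["F"])

def Spec_check_functions (path : List String) (part_a : List String) (part_b : List String) (part_c : List String) (out : List String) : Prop := out = check_functions_alt path part_a part_b part_c
instance (path : List String) (part_a : List String) (part_b : List String) (part_c : List String) (out : List String) : Decidable (Spec_check_functions path part_a part_b part_c out) := by unfold Spec_check_functions; infer_instance

-- ===== CLAIM (what is proved, stated in full; the proofs are below) =====
def Claim_equal_check_functions : Prop := ∀ (path : List String) (part_a : List String) (part_b : List String) (part_c : List String), Dom_check_functions path part_a part_b part_c → Pre_check_functions path part_a part_b part_c → Spec_check_functions path part_a part_b part_c (check_functions path part_a part_b part_c)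

-- ===== LEMMAS AND PROOFS =====
-- Loop invariant: with all parts nonempty and enough fuel, B's loop computes
-- acc ++ (A's recursive result on the remaining path).
theorem cfLoop_eq (part_a part_b part_c : List String)
    (ha : part_a ≠ []) (hb : part_b ≠ []) (hc : part_c ≠ []) :
    ∀ (fuel : Nat) (rem acc : List String), rem.length < fuel →
      cfLoop part_a part_b part_c fuel rem acc
        = acc ++ check_functions rem part_a part_b part_c := by
  intro fuel
  induction fuel with
  | zero => intro rem acc h; omega
  | succ n ih =>
    intro rem acc h
    by_cases hr : rem = []
    · subst hr; simp [cfLoop, check_functions]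
    · rw [cfLoop, check_functions]
      simp only [hr, if_false, dif_neg ha, dif_neg hb, dif_neg hc]
      have hrl : 0 < rem.length := List.length_pos_iff.mpr hr
      by_cases h1 : rem.take part_a.length = part_a
      · have : part_a.length ≥ 1 := by
          cases part_a with | nil => exact absurd rfl ha | cons _ _ => simp
        rw [if_pos h1, if_pos h1, ih _ _ (by simp; omega)]; simp
      · rw [if_neg h1, if_neg h1]
        by_cases h2 : rem.take part_b.length = part_b
        · have : part_b.length ≥ 1 := by
            cases part_b with | nil => exact absurd rfl hb | cons _ _ => simp
          rw [if_pos h2, if_pos h2, ih _ _ (by simp; omega)]; simp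
        · rw [if_neg h2, if_neg h2]
          by_cases h3 : rem.take part_c.length = part_c
          · have : part_c.length ≥ 1 := by
              cases part_c with | nil => exact absurd rfl hc | cons _ _ => simp
            rw [if_pos h3, if_pos h3, ih _ _ (by simp; omega)]; simp
          · rw [if_neg h3, if_neg h3]; simp

-- ===== VERDICT (by name: the statement is the Claim_ definition above) =====
theorem check_functions_spec : Claim_equal_check_functions := by
  intro path part_a part_b part_c _ hpre
  unfold Spec_check_functions check_functions_alt
  rcases hpre with h | ⟨ha, hb, hc⟩
  · subst h; simp [cfLoop, check_functions]
  · rw [cfLoop_eq part_a part_b part_c ha hb hc _ _ _ (by omega)]; simp
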